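-- pv_equiv track=rewrite | github.com/permitio/opal | packages/opal-server/opal_server/data/data_update_publisher.py | get_topic_combos
-- ===== SOURCE A (Python) =====
-- from typing import List
--
-- TOPIC_DELIMITER = "/"
--
-- PREFIX_DELIMITER = ":"
--
-- def get_topic_combos(topic: str) -> List[str]:
--     """Get the The combinations of sub topics for the given topic e.g.
--     "policy_data/users/keys" -> ["policy_data", "policy_data/users",
--     "policy_data/users/keys"]
--
--     If a colon (':') is present, only split after the right-most one,
--     and prepend the prefix before it to every topic, e.g.
--     "data:policy_data/users/keys" -> ["data:policy_data", "data:policy_data/users",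
--     "data:policy_data/users/keys"]
--
--     Args:
--         topic (str): topic string with sub topics delimited by delimiter
--
--     Returns:
--         List[str]: The combinations of sub topics for the given topic
--     """
--     topic_combos = []
--
--     prefix = None
--     if PREFIX_DELIMITER in topic:
--         prefix, topic = topic.rsplit(":", 1)
--
--     sub_topics = topic.split(TOPIC_DELIMITER)
--
--     if sub_topics:
--         current_topic = sub_topics[0]
--
--         if prefix:
--             topic_combos.append(f"{prefix}{PREFIX_DELIMITER}{current_topic}")
--         else:
--             topic_combos.append(current_topic)
--         if len(sub_topics) > 1:
--             for sub in sub_topics[1:]: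
--                 current_topic = f"{current_topic}{TOPIC_DELIMITER}{sub}"
--                 if prefix:
--                     topic_combos.append(
--                         f"{prefix}{PREFIX_DELIMITER}{current_topic}"
--                     )
--                 else:
--                     topic_combos.append(current_topic)
--
--     return topic_combos
-- ===== SOURCE B (Python) =====
-- def get_topic_combos(topic: str) -> list:
--     prefix, _, rest = topic.rpartition(":")
--     parts = rest.split("/")
--     combos = ["/".join(parts[:i + 1]) for i in range(len(parts))]
--     if prefix:
--         combos = [f"{prefix}:{c}" for c in combos]
--     return combos
-- ===== Notes on version B (the rewrite author's own statement) =====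
-- stated objective: simpler
-- what changed: Replaces the None-sentinel prefix handling and the running current_topic accumulator loop by str.rpartition plus a slice-rejoin comprehension ('/'.join(parts[:i+1])), with the prefix mapped over the result once at the end.
import Mathlib
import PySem

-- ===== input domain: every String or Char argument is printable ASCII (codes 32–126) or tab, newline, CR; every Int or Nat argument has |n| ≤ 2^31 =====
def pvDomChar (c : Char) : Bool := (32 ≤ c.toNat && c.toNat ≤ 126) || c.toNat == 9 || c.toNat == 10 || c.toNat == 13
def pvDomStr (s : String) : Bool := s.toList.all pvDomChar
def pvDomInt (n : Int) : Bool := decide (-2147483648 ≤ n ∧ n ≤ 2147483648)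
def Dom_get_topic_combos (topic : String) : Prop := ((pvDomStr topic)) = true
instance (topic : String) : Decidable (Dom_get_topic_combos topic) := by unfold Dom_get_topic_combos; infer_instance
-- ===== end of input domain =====

-- B replaces A's running current_topic accumulator by rpartition + slice-rejoin comprehensions (simpler decomposition; same cost).


-- ===== PORT A =====
-- Python string concatenation a + c + b (one middle character), exact on code points.
def pyConcat3 (a : String) (c : Char) (b : String) : String :=
  String.ofList (a.toList ++ c :: b.toList)

-- Port of A.  'prefix, topic = topic.rsplit(":", 1)' is ported by hand via PySem.Str.rfind:
-- exact, since it runs only when ':' occurs, so rfind gives the index of the right-most ':'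
-- and the two pieces are the slices around it.  splitting on the topic delimiter is split? with a
-- non-empty separator, so getD [] never fires.
def get_topic_combos (topic : String) : List String :=
  let pr : Option String × String :=
    if PySem.Str.isIn ":" topic then
      let i := (PySem.Str.rfind topic ":").toNat
      (some (String.ofList (topic.toList.take i)), String.ofList (topic.toList.drop (i+1)))
    else (none, topic)
  let sub_topics := (PySem.Str.split? pr.2 "/").getD []
  -- 'if prefix:' (truthiness of Optional[str]) rendered once, used at both append sites:
  let tag : String → String := fun c =>
    match pr.1 with
    | some p => if p ≠ "" then pyConcat3 p ':' c else c
    | none => c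
  match sub_topics with
  | [] => []
  | first :: rest =>
      (rest.foldl (fun (st : List String × String) sub =>
          (st.1 ++ [tag (pyConcat3 st.2 '/' sub)], pyConcat3 st.2 '/' sub))
        ([tag first], first)).1

-- ===== PORT B =====
-- Port of B.  'prefix, _, rest = topic.rpartition(":")' is ported by hand via PySem.Str.rfind:
-- exact — prefix = "" and rest = topic when ':' is absent (rfind = -1), otherwise the slices
-- around the right-most ':'.  The comprehension over range(len(parts)) is a map over List.range.
def get_topic_combos_alt (topic : String) : List String :=
  let i := PySem.Str.rfind topic ":"
  let pre := if i = -1 then "" else String.ofList (topic.toList.take i.toNat)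
  let rest := if i = -1 then topic else String.ofList (topic.toList.drop (i.toNat+1))
  let parts := (PySem.Str.split? rest "/").getD []
  let combos := (List.range parts.length).map (fun k => PySem.Str.join "/" (parts.take (k+1)))
  if pre ≠ "" then combos.map (fun c => pyConcat3 pre ':' c) else combos

-- ===== PRECONDITION & SPEC =====
def Spec_get_topic_combos (topic : String) (out : List String) : Prop := out = get_topic_combos_alt topic
instance (topic : String) (out : List String) : Decidable (Spec_get_topic_combos topic out) := by unfold Spec_get_topic_combos; infer_instance

-- ===== CLAIM (what is proved, stated in full; the proofs are below) =====
def Claim_equal_get_topic_combos : Prop := ∀ (topic : String), Dom_get_topic_combos topic → Spec_get_topic_combos topic (get_topic_combos topic)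

-- ===== LEMMAS AND PROOFS =====

-- evaluation equations for rfind's descending scan
theorem rfind_go_zero (s sub : List Char) :
    PySem.Chars.rfind.go s sub 0 = (if sub.isPrefixOf s then (0:Int) else -1) := by
  simp only [PySem.Chars.rfind.go]

theorem rfind_go_succ (s sub : List Char) (n : Nat) :
    PySem.Chars.rfind.go s sub (n+1) =
      (if sub.isPrefixOf (s.drop (n+1)) then ((n+1 : Nat) : Int) else PySem.Chars.rfind.go s sub n) := by
  simp only [PySem.Chars.rfind.go]

-- the scan returns -1 exactly when no start index ≤ i carries the pattern
theorem rfind_go_eq_neg_one_iff (s sub : List Char) (i : Nat) :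
    PySem.Chars.rfind.go s sub i = -1 ↔ ∀ j ≤ i, sub.isPrefixOf (s.drop j) = false := by
  induction i with
  | zero =>
      rw [rfind_go_zero]
      rcases hb : sub.isPrefixOf s with _ | _
      · simp only [Bool.false_eq_true, if_false]
        constructor
        · intro _ j hj
          interval_cases j
          rw [List.drop_zero]
          exact hb
        · intro _; trivial
      · simp only [if_true]
        constructor
        · intro h; exact absurd h (by norm_num)
        · intro h
          have := h 0 (Nat.le_refl 0)
          rw [List.drop_zero, hb] at this
          exact absurd this (by simp)
  | succ n ih =>
      rw [rfind_go_succ]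
      rcases hb : sub.isPrefixOf (s.drop (n+1)) with _ | _
      · simp only [Bool.false_eq_true, if_false, ih]
        constructor
        · intro h j hj
          rcases Nat.lt_succ_iff_lt_or_eq.mp (Nat.lt_succ_of_le hj) with h' | h'
          · exact h j (Nat.lt_succ_iff.mp h')
          · subst h'; exact hb
        · intro h j hj; exact h j (Nat.le_succ_of_le hj)
      · simp only [if_true]
        constructor
        · intro h; exfalso; omega
        · intro h
          have := h (n+1) (Nat.le_refl _)
          rw [hb] at this
          exact absurd this (by simp)

-- 'x in s' agrees with 'rfind ≠ -1' (both say: the pattern occurs somewhere)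
theorem rfind_eq_neg_one_iff (s sub : List Char) :
    PySem.Chars.rfind s sub = -1 ↔ PySem.Chars.isIn sub s = false := by
  have h1 : PySem.Chars.rfind s sub = PySem.Chars.rfind.go s sub s.length := rfl
  rw [h1, rfind_go_eq_neg_one_iff]
  have h2 := PySem.Chars.exists_prefix_drop_iff_isIn sub s
  constructor
  · intro h
    rcases hb : PySem.Chars.isIn sub s with _ | _
    · rfl
    · exfalso
      obtain ⟨j, hj⟩ := h2.mpr hb
      rw [← List.isPrefixOf_iff_prefix] at hj
      by_cases hle : j ≤ s.length
      · rw [h j hle] at hj; exact absurd hj (by simp)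
      · have hd : s.drop j = [] := List.drop_eq_nil_of_le (by omega)
        rw [hd] at hj
        have hsub : sub = [] := by simpa using hj
        have h0 := h 0 (Nat.zero_le _)
        rw [List.drop_zero, hsub] at h0
        simp at h0
  · intro h j _
    rcases hb2 : sub.isPrefixOf (s.drop j) with _ | _
    · rfl
    · exfalso
      have hmem : PySem.Chars.isIn sub s = true := h2.mp ⟨j, List.isPrefixOf_iff_prefix.mp hb2⟩
      rw [h] at hmem; exact Bool.false_ne_true hmem

-- joining a list whose head already carries one separator merges with the un-concatenated pair
theorem chars_join_merge (sep a b : List Char) (l : List (List Char)) :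
    PySem.Chars.join sep ((a ++ sep ++ b) :: l) = PySem.Chars.join sep (a :: b :: l) := by
  cases l with
  | nil => rw [PySem.Chars.join_singleton, PySem.Chars.join_cons_cons, PySem.Chars.join_singleton]
  | cons x xs =>
      rw [PySem.Chars.join_cons_cons, PySem.Chars.join_cons_cons, PySem.Chars.join_cons_cons]
      simp [List.append_assoc]

theorem str_join_merge (a b : String) (l : List String) :
    PySem.Str.join "/" (pyConcat3 a '/' b :: l) = PySem.Str.join "/" (a :: b :: l) := by
  simp only [PySem.Str.join, pyConcat3, List.map_cons]
  congr 1
  have h : (String.ofList (a.toList ++ '/' :: b.toList)).toList = a.toList ++ ['/'] ++ b.toList := by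
    simp
  rw [h]
  exact chars_join_merge _ _ _ _

theorem str_join_singleton (p : String) : PySem.Str.join "/" [p] = p := by
  simp [PySem.Str.join, PySem.Chars.join_singleton]

theorem str_join_pair (a b : String) : PySem.Str.join "/" [a, b] = pyConcat3 a '/' b := by
  rw [← str_join_merge a b [], str_join_singleton]

-- A's accumulator loop, characterised: it emits the tagged joins of the growing slices
theorem fold_eq (tag : String → String) (t : List String) :
    ∀ (first : String) (acc : List String),
    (t.foldl (fun (st : List String × String) sub =>
        (st.1 ++ [tag (pyConcat3 st.2 '/' sub)], pyConcat3 st.2 '/' sub)) (acc, first)).1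
    = acc ++ (List.range t.length).map
        (fun k => tag (PySem.Str.join "/" (first :: t.take (k+1)))) := by
  induction t with
  | nil => intro first acc; simp
  | cons s t ih =>
      intro first acc
      simp only [List.foldl_cons]
      rw [ih]
      simp only [List.length_cons, List.range_succ_eq_map, List.map_cons, List.map_map,
        List.take_succ_cons, List.take_zero]
      rw [List.append_assoc, List.singleton_append]
      congr 1
      congr 1
      · rw [str_join_pair]
      · apply List.map_congr_left
        intro k _
        simp only [Function.comp_apply, Nat.succ_eq_add_one]
        rw [str_join_merge]

-- the match-plus-loop of A on any parts list equals B's slice-rejoin comprehension, tagged after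
theorem core_eq (tag : String → String) (first : String) (rest : List String) :
    (rest.foldl (fun (st : List String × String) sub =>
        (st.1 ++ [tag (pyConcat3 st.2 '/' sub)], pyConcat3 st.2 '/' sub))
      ([tag first], first)).1
    = ((List.range (first :: rest).length).map
        (fun k => PySem.Str.join "/" ((first :: rest).take (k+1)))).map tag := by
  rw [fold_eq]
  simp only [List.length_cons, List.range_succ_eq_map, List.map_cons, List.map_map,
    List.take_succ_cons, List.take_zero]
  rw [List.singleton_append, str_join_singleton]
  congr 1

-- ===== VERDICT (by name: the statement is the Claim_ definition above) =====
theorem get_topic_combos_spec : Claim_equal_get_topic_combos := by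
  intro topic _
  unfold Spec_get_topic_combos get_topic_combos get_topic_combos_alt
  by_cases h : PySem.Str.isIn ":" topic = true
  · -- colon present: rfind ≠ -1, identical prefix/rest slices on both sides
    have hne : PySem.Str.rfind topic ":" ≠ -1 := by
      rw [PySem.Str.rfind_eq, Ne, rfind_eq_neg_one_iff, ← PySem.Str.isIn_eq, h]
      simp
    simp only [h, if_true, if_neg hne]
    generalize (PySem.Str.split? (String.ofList (List.drop ((PySem.Str.rfind topic ":").toNat + 1) topic.toList)) "/").getD [] = parts
    generalize String.ofList (List.take (PySem.Str.rfind topic ":").toNat topic.toList) = p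
    by_cases hp : p = ""
    · subst hp
      simp only [ne_eq, not_true_eq_false, if_false]
      cases parts with
      | nil => rfl
      | cons first rest => simpa using core_eq (fun c => c) first rest
    · simp only [ne_eq, hp, not_false_eq_true, if_true]
      cases parts with
      | nil => simp
      | cons first rest => simpa using core_eq (fun c => pyConcat3 p ':' c) first rest
  · -- no colon: prefix is None / "", both sides untagged
    have heq : PySem.Str.rfind topic ":" = -1 := by
      rw [PySem.Str.rfind_eq, rfind_eq_neg_one_iff, ← PySem.Str.isIn_eq]
      exact Bool.not_eq_true _ |>.mp h
    simp only [h, Bool.false_eq_true, if_false, if_pos heq, ne_eq, not_true_eq_false]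
    generalize (PySem.Str.split? topic "/").getD [] = parts
    cases parts with
    | nil => rfl
    | cons first rest => simpa using core_eq (fun c => c) first rest
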